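-- pv_equiv track=rewrite | github.com/Creeper0809/baekjoon | 게임이론/9661.py | calculate_grundy_dp
-- ===== SOURCE A (Python) =====
-- def calculate_grundy_dp(n, memo):
--     # 돌이 0개일 때의 그런디 수는 0
--     if n == 1:
--         return 1
--     # memoization
--     if n in memo:
--         return memo[n]
--     s = set()
--     for i in range(10):
--         num = 4 ** i
--         if n - num < 0:
--             break
--         s.add(calculate_grundy_dp(n - num, memo))
--
--     grundy = 0
--     # mex 함수를 계산하여 그런디 수를 결정
--     while grundy in s:
--         grundy += 1
--     memo[n] = grundy
--     return grundy
-- ===== SOURCE B (Python) =====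
-- # Bottom-up table DP instead of A's top-down recursion with memoization.
-- # Return-value equivalence only: A writes every computed subresult into `memo`; B does not mutate it.
-- def calculate_grundy_dp(n, memo):
--     if n == 1:
--         return 1
--     if n in memo:
--         return memo[n]
--     if n < 1:
--         return 0
--     g = [0] * (n + 1)
--     g[0] = memo.get(0, 0)
--     g[1] = 1
--     for k in range(2, n + 1):
--         if k in memo:
--             g[k] = memo[k]
--             continue
--         s = set()
--         p = 1
--         while p <= k:
--             s.add(g[k - p])
--             p *= 4
--         m = 0
--         while m in s:
--             m += 1
--         g[k] = m
--     return g[n]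
-- ===== Notes on version B (the rewrite author's own statement) =====
-- stated objective: alternative
-- what changed: Replaces A's top-down recursion with an in-place memo dict by a single bottom-up table DP (one array pass 2..n with an iterative power loop and the same mex scan); B does not mutate memo and does not recurse, so it also survives large n where A overruns the recursion limit.
-- outside the precondition, e.g. on calculate_grundy_dp(800, {}): A returns 0, B returns 0; on calculate_grundy_dp(750, {749: 5}): A returns 0, B returns 0
import Mathlib
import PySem

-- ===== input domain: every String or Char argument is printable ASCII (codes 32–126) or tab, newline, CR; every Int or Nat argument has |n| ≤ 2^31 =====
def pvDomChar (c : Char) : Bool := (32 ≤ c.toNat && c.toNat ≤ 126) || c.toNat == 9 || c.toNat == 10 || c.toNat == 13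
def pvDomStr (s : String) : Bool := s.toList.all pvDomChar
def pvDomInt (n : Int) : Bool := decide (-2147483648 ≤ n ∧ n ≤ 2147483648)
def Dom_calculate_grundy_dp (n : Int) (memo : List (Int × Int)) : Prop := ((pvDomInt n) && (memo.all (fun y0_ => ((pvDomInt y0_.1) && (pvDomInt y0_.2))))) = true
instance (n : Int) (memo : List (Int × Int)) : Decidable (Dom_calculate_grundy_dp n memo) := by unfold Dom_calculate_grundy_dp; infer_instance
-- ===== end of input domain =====

-- B replaces A's top-down recursion-with-memoization by a bottom-up table DP (objective: alternative;
-- also returns where A's deep recursion would raise RecursionError). A mutates `memo` in place; B does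
-- not: the equivalence proved here is about the RETURN value only.

-- ===== PORT A =====

-- while grundy in s: grundy += 1  (fuel s.length+1 always suffices: the hits 0,1,2,… are distinct members of s)
def pvMexLoop : Nat → PySem.Set Int → Int → Int
  | 0, _, g => g
  | f+1, s, g => if PySem.Set.contains s g then pvMexLoop f s (g + 1) else g

def pvMex (s : PySem.Set Int) : Int := pvMexLoop (s.length + 1) s 0

-- A's recursion, fueled (fuel n.toNat+1 suffices: every recursive call strictly decreases n.toNat);
-- the memo dict is threaded through in Python's mutation order.
def pvGoA : Nat → Int → PySem.Dict Int Int → Int × PySem.Dict Int Int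
  | 0, _, memo => (0, memo)
  | f+1, n, memo =>
    if n = 1 then (1, memo)
    else
      match PySem.Dict.get? memo n with
      | some v => (v, memo)
      | none =>
        let st := (List.range 10).foldl (fun (st : Bool × PySem.Set Int × PySem.Dict Int Int) i =>
          if st.1 then st
          else
            let num : Int := (4 : Int) ^ i
            if n - num < 0 then (true, st.2.1, st.2.2)
            else
              let r := pvGoA f (n - num) st.2.2
              (false, PySem.Set.add st.2.1 r.1, r.2)) (false, PySem.Set.empty, memo)
        let grundy := pvMex st.2.1
        (grundy, PySem.Dict.insert st.2.2 n grundy)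

def calculate_grundy_dp (n : Int) (memo : List (Int × Int)) : Int :=
  (pvGoA (n.toNat + 1) n (PySem.Dict.ofList memo)).1

-- ===== PORT B =====

-- while p <= k: s.add(g[k - p]); p *= 4   (fuel 40 suffices within Dom: 4^40 > 2^31 ≥ k)
def pvAddMoves : Nat → Int → Int → List Int → PySem.Set Int → PySem.Set Int
  | 0, _, _, _, s => s
  | f+1, p, k, g, s =>
    if p ≤ k then pvAddMoves f (4 * p) k g (PySem.Set.add s (PySem.List.pyGetD g (k - p) 0)) else s

-- one iteration of B's table loop (body of `for k in range(2, n+1)`)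
def pvStepB (d : PySem.Dict Int Int) (g : List Int) (k : Int) : List Int :=
  match PySem.Dict.get? d k with
  | some v => PySem.List.pySetD g k v
  | none => PySem.List.pySetD g k (pvMex (pvAddMoves 40 1 k g PySem.Set.empty))

def calculate_grundy_dp_alt (n : Int) (memo : List (Int × Int)) : Int :=
  let d := PySem.Dict.ofList memo
  if n = 1 then 1
  else
    match PySem.Dict.get? d n with
    | some v => v
    | none =>
      if n < 1 then 0
      else
        let g0 := PySem.List.pySetD (PySem.List.pySetD (List.replicate (n.toNat + 1) 0) 0
                    (PySem.Dict.getD d 0 0)) 1 1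
        let g := (PySem.List.pyRange 2 (n + 1) 1).foldl (pvStepB d) g0
        PySem.List.pyGetD g n 0

-- ===== PRECONDITION & SPEC =====
-- Pre_ excludes inputs with n > 700 whose grundy value is not already memoised: there A's recursion
-- (depth ≈ n) overruns Python's recursion limit and raises RecursionError. The bound is conservative:
-- A still returns for some larger n (up to ≈1000 unmemoised, or any n with a sufficiently pre-filled
-- memo), and B agrees with A there too.
def Pre_calculate_grundy_dp (n : Int) (memo : List (Int × Int)) : Prop :=
  n ≤ 700 ∨ (PySem.Dict.ofList memo).contains n = true
instance (n : Int) (memo : List (Int × Int)) : Decidable (Pre_calculate_grundy_dp n memo) := by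
  unfold Pre_calculate_grundy_dp; infer_instance

def pvWitness_calculate_grundy_dp : Int × (List (Int × Int)) := (10, [])

def Spec_calculate_grundy_dp (n : Int) (memo : List (Int × Int)) (out : Int) : Prop := out = calculate_grundy_dp_alt n memo
instance (n : Int) (memo : List (Int × Int)) (out : Int) : Decidable (Spec_calculate_grundy_dp n memo out) := by unfold Spec_calculate_grundy_dp; infer_instance

-- ===== CLAIM (what is proved, stated in full; the proofs are below) =====
def Claim_equal_calculate_grundy_dp : Prop := ∀ (n : Int) (memo : List (Int × Int)), Dom_calculate_grundy_dp n memo → Pre_calculate_grundy_dp n memo → Spec_calculate_grundy_dp n memo (calculate_grundy_dp n memo)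

-- ===== LEMMAS AND PROOFS =====

-- the powers 4^i tried from position k (break at the first 4^i > k; for k ≤ 700 the range-10 cap never binds)
def pvPows (k : Int) : List Int :=
  ((List.range 10).takeWhile (fun i => decide ((4 : Int) ^ i ≤ k))).map (fun i => (4 : Int) ^ i)

-- the same powers, generated the way B generates them (p = 1, 4p, …)
def pvPowsW : Nat → Int → Int → List Int
  | 0, _, _ => []
  | f+1, p, k => if p ≤ k then p :: pvPowsW f (4 * p) k else []

-- the pure value A's recursion computes relative to the ORIGINAL memo (fueled; fuel n.toNat+1 suffices)
def pvF : Nat → PySem.Dict Int Int → Int → Int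
  | 0, _, _ => 0
  | f+1, d, n =>
    if n = 1 then 1
    else
      match PySem.Dict.get? d n with
      | some v => v
      | none => pvMex (PySem.Set.ofList ((pvPows n).map (fun p => pvF f d (n - p))))

-- A's memo during the run: original entries are preserved, new entries carry the pure value
def pvInv (d0 m : PySem.Dict Int Int) : Prop :=
  (∀ k v, PySem.Dict.get? d0 k = some v → PySem.Dict.get? m k = some v) ∧
  (∀ k v, PySem.Dict.get? m k = some v → PySem.Dict.get? d0 k = some v ∨ v = pvF (k.toNat + 1) d0 k)

theorem mem_pvPows {p k : Int} (h : p ∈ pvPows k) : 1 ≤ p ∧ p ≤ k := by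
  simp only [pvPows, List.mem_map] at h
  obtain ⟨i, hi, rfl⟩ := h
  have hle := List.mem_takeWhile_imp hi
  simp only [decide_eq_true_eq] at hle
  exact ⟨one_le_pow₀ (by norm_num), hle⟩

theorem pvF_irrel (d : PySem.Dict Int Int) : ∀ (f f' : Nat) (n : Int),
    n.toNat < f → n.toNat < f' → pvF f d n = pvF f' d n := by
  intro f
  induction f with
  | zero => intro f' n h; omega
  | succ f ih =>
    intro f' n hf hf'
    cases f' with
    | zero => omega
    | succ f' =>
      simp only [pvF]
      by_cases h1 : n = 1
      · simp [h1]
      · simp only [h1, if_false]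
        cases hg : PySem.Dict.get? d n with
        | some v => simp
        | none =>
          simp only []
          congr 2
          apply List.map_congr_left
          intro p hp
          obtain ⟨hp1, hp2⟩ := mem_pvPows hp
          exact ih f' (n - p) (by omega) (by omega)

theorem pows_eq (k : Int) (hk : k ≤ 700) : pvPowsW 40 1 k = pvPows k := by
  have r10 : List.range 10 = [0,1,2,3,4,5,6,7,8,9] := by decide
  have hno : ¬ ((1024 : Int) ≤ k) := by omega
  by_cases h1 : (1:Int) ≤ k
  · by_cases h4 : (4:Int) ≤ k
    · by_cases h16 : (16:Int) ≤ k
      · by_cases h64 : (64:Int) ≤ k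
        · by_cases h256 : (256:Int) ≤ k
          · norm_num [pvPows, r10, List.takeWhile, pvPowsW, h1, h4, h16, h64, h256, hno]
          · norm_num [pvPows, r10, List.takeWhile, pvPowsW, h1, h4, h16, h64, h256]
        · norm_num [pvPows, r10, List.takeWhile, pvPowsW, h1, h4, h16, h64]
      · norm_num [pvPows, r10, List.takeWhile, pvPowsW, h1, h4, h16]
    · norm_num [pvPows, r10, List.takeWhile, pvPowsW, h1, h4]
  · norm_num [pvPows, r10, List.takeWhile, pvPowsW, h1]

theorem addMoves_eq : ∀ (f : Nat) (p k : Int) (g : List Int) (s : PySem.Set Int),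
    pvAddMoves f p k g s =
      (pvPowsW f p k).foldl (fun s q => PySem.Set.add s (PySem.List.pyGetD g (k - q) 0)) s := by
  intro f
  induction f with
  | zero => intro p k g s; rfl
  | succ f ih =>
    intro p k g s
    simp only [pvAddMoves, pvPowsW]
    by_cases hp : p ≤ k
    · simp [hp, ih]
    · simp [hp]

theorem pvGoA_fold_done (f : Nat) (n : Int) : ∀ (L : List Nat) (s : PySem.Set Int) (m : PySem.Dict Int Int),
    L.foldl (fun (st : Bool × PySem.Set Int × PySem.Dict Int Int) i =>
          if st.1 then st
          else
            if n - (4 : Int) ^ i < 0 then (true, st.2.1, st.2.2)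
            else (false, PySem.Set.add st.2.1 (pvGoA f (n - (4 : Int) ^ i) st.2.2).1,
                  (pvGoA f (n - (4 : Int) ^ i) st.2.2).2)) (true, s, m) = (true, s, m) := by
  intro L
  induction L with
  | nil => intro s m; rfl
  | cons i L ih => intro s m; simpa using ih s m

theorem goA_spec (d0 : PySem.Dict Int Int) : ∀ (f : Nat) (n : Int) (m : PySem.Dict Int Int),
    n.toNat < f → pvInv d0 m →
    (pvGoA f n m).1 = pvF (n.toNat + 1) d0 n ∧ pvInv d0 (pvGoA f n m).2 := by
  intro f
  induction f with
  | zero => intro n m h; omega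
  | succ f ih =>
    intro n m hf hInv
    by_cases h1 : n = 1
    · subst h1
      refine ⟨by simp [pvGoA, pvF], by simpa [pvGoA] using hInv⟩
    cases hg : PySem.Dict.get? m n with
    | some v =>
      have hA : pvGoA (f+1) n m = (v, m) := by simp [pvGoA, h1, hg]
      rw [hA]
      refine ⟨?_, hInv⟩
      rcases hInv.2 n v hg with hd | hv
      · simp [pvF, h1, hd]
      · exact hv
    | none =>
      have hd0 : PySem.Dict.get? d0 n = none := by
        cases hdd : PySem.Dict.get? d0 n with
        | none => rfl
        | some w => exact absurd (hInv.1 n w hdd) (by simp [hg])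
      have aux : ∀ (L : List Nat) (s : PySem.Set Int) (m' : PySem.Dict Int Int), pvInv d0 m' →
          (L.foldl (fun (st : Bool × PySem.Set Int × PySem.Dict Int Int) i =>
            if st.1 then st
            else
              if n - (4 : Int) ^ i < 0 then (true, st.2.1, st.2.2)
              else (false, PySem.Set.add st.2.1 (pvGoA f (n - (4 : Int) ^ i) st.2.2).1,
                    (pvGoA f (n - (4 : Int) ^ i) st.2.2).2)) (false, s, m')).2.1 =
            (L.takeWhile (fun i => decide ((4 : Int) ^ i ≤ n))).foldl
              (fun s i => PySem.Set.add s (pvF ((n - (4 : Int) ^ i).toNat + 1) d0 (n - (4 : Int) ^ i))) s ∧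
          pvInv d0 (L.foldl (fun (st : Bool × PySem.Set Int × PySem.Dict Int Int) i =>
            if st.1 then st
            else
              if n - (4 : Int) ^ i < 0 then (true, st.2.1, st.2.2)
              else (false, PySem.Set.add st.2.1 (pvGoA f (n - (4 : Int) ^ i) st.2.2).1,
                    (pvGoA f (n - (4 : Int) ^ i) st.2.2).2)) (false, s, m')).2.2 := by
        intro L
        induction L with
        | nil => intro s m' hm'; exact ⟨rfl, hm'⟩
        | cons i L ihL =>
          intro s m' hm'
          by_cases hbr : n - (4 : Int) ^ i < 0
          · have hpred : ¬ ((4 : Int) ^ i ≤ n) := by omega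
            simp only [List.foldl_cons, List.takeWhile_cons, hpred, decide_false, if_false,
              Bool.false_eq_true, hbr, if_true, pvGoA_fold_done]
            exact ⟨rfl, hm'⟩
          · have hp1 : (1 : Int) ≤ (4 : Int) ^ i := one_le_pow₀ (by norm_num)
            have hfuel : (n - (4 : Int) ^ i).toNat < f := by omega
            obtain ⟨hr1, hr2⟩ := ih (n - (4 : Int) ^ i) m' hfuel hm'
            have hpred : ((4 : Int) ^ i ≤ n) := by omega
            simp only [List.foldl_cons, List.takeWhile_cons, hpred, decide_true, if_true,
              Bool.false_eq_true, if_false, hbr, hr1]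
            have := ihL (PySem.Set.add s (pvF ((n - (4 : Int) ^ i).toNat + 1) d0 (n - (4 : Int) ^ i)))
              (pvGoA f (n - (4 : Int) ^ i) m').2 hr2
            exact this
      obtain ⟨hs, hI⟩ := aux (List.range 10) PySem.Set.empty m hInv
      have hA : pvGoA (f+1) n m = (pvMex (((List.range 10)).foldl (fun (st : Bool × PySem.Set Int × PySem.Dict Int Int) i =>
            if st.1 then st
            else
              if n - (4 : Int) ^ i < 0 then (true, st.2.1, st.2.2)
              else (false, PySem.Set.add st.2.1 (pvGoA f (n - (4 : Int) ^ i) st.2.2).1,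
                    (pvGoA f (n - (4 : Int) ^ i) st.2.2).2)) (false, PySem.Set.empty, m)).2.1,
            PySem.Dict.insert ((List.range 10).foldl (fun (st : Bool × PySem.Set Int × PySem.Dict Int Int) i =>
            if st.1 then st
            else
              if n - (4 : Int) ^ i < 0 then (true, st.2.1, st.2.2)
              else (false, PySem.Set.add st.2.1 (pvGoA f (n - (4 : Int) ^ i) st.2.2).1,
                    (pvGoA f (n - (4 : Int) ^ i) st.2.2).2)) (false, PySem.Set.empty, m)).2.2 n
              (pvMex ((List.range 10).foldl (fun (st : Bool × PySem.Set Int × PySem.Dict Int Int) i =>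
            if st.1 then st
            else
              if n - (4 : Int) ^ i < 0 then (true, st.2.1, st.2.2)
              else (false, PySem.Set.add st.2.1 (pvGoA f (n - (4 : Int) ^ i) st.2.2).1,
                    (pvGoA f (n - (4 : Int) ^ i) st.2.2).2)) (false, PySem.Set.empty, m)).2.1)) := by
        simp [pvGoA, h1, hg]
      have hval : pvMex (((List.range 10)).foldl (fun (st : Bool × PySem.Set Int × PySem.Dict Int Int) i =>
            if st.1 then st
            else
              if n - (4 : Int) ^ i < 0 then (true, st.2.1, st.2.2)
              else (false, PySem.Set.add st.2.1 (pvGoA f (n - (4 : Int) ^ i) st.2.2).1,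
                    (pvGoA f (n - (4 : Int) ^ i) st.2.2).2)) (false, PySem.Set.empty, m)).2.1 =
          pvF (n.toNat + 1) d0 n := by
        rw [hs]
        have hpvf : pvF (n.toNat + 1) d0 n =
            pvMex (PySem.Set.ofList ((pvPows n).map (fun p => pvF n.toNat d0 (n - p)))) := by
          simp [pvF, h1, hd0]
        have hmap : (pvPows n).map (fun p => pvF n.toNat d0 (n - p)) =
            ((List.range 10).takeWhile (fun i => decide ((4 : Int) ^ i ≤ n))).map
              (fun i => pvF ((n - (4 : Int) ^ i).toNat + 1) d0 (n - (4 : Int) ^ i)) := by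
          rw [pvPows, List.map_map]
          apply List.map_congr_left
          intro i hi
          have h4 := List.mem_takeWhile_imp hi
          simp only [decide_eq_true_eq] at h4
          have hp1 : (1 : Int) ≤ (4 : Int) ^ i := one_le_pow₀ (by norm_num)
          simp only [Function.comp]
          exact pvF_irrel d0 n.toNat ((n - (4 : Int) ^ i).toNat + 1) (n - (4 : Int) ^ i)
            (by omega) (by omega)
        rw [hpvf, hmap, ← PySem.Set.update_nil_left, PySem.Set.update_map_eq_foldl_add]
        rfl
      refine ⟨by rw [hA]; exact hval, ?_⟩
      rw [hA]
      dsimp only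
      constructor
      · intro k v hk
        by_cases hkn : k = n
        · subst hkn; rw [hd0] at hk; exact absurd hk (by simp)
        · rw [PySem.Dict.get?_insert, if_neg hkn]
          exact hI.1 k v hk
      · intro k v hk
        by_cases hkn : k = n
        · subst hkn
          rw [PySem.Dict.get?_insert_self] at hk
          right
          rw [← hval]
          exact (Option.some_injective _ hk).symm
        · rw [PySem.Dict.get?_insert, if_neg hkn] at hk
          exact hI.2 k v hk

def pvG0 (d0 : PySem.Dict Int Int) (n : Int) : List Int :=
  PySem.List.pySetD (PySem.List.pySetD (List.replicate (n.toNat + 1) 0) 0 (PySem.Dict.getD d0 0 0)) 1 1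

theorem g0_get (d0 : PySem.Dict Int Int) (n : Int) (h2 : 2 ≤ n) (i : Nat) (hi : i ≤ n.toNat) :
    PySem.List.pyGetD (pvG0 d0 n) (i : Int) 0 =
      if i = 1 then 1 else if i = 0 then PySem.Dict.getD d0 0 0 else 0 := by
  have hlen : 2 ≤ n.toNat := by omega
  have e1 : pvG0 d0 n = ((List.replicate (n.toNat + 1) (0:Int)).set 0 (PySem.Dict.getD d0 0 0)).set 1 1 := by
    rw [pvG0, PySem.List.pySetD_of_nonneg _ _ (by norm_num : (0:Int) ≤ 1),
      PySem.List.pySetD_of_nonneg _ _ (by norm_num : (0:Int) ≤ 0)]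
    norm_num
  rw [e1, PySem.List.pyGetD_natCast]
  match i with
  | 0 =>
    simp only [List.getD_eq_getElem?_getD, List.getElem?_set, List.getElem?_replicate]
    norm_num
  | 1 =>
    simp only [List.getD_eq_getElem?_getD, List.getElem?_set, List.length_set,
      List.length_replicate]
    norm_num
    split_ifs <;> simp_all <;> omega
  | (i+2) =>
    simp only [List.getD_eq_getElem?_getD, List.getElem?_set, List.getElem?_replicate]
    norm_num
    split_ifs <;> simp_all <;> omega

theorem g0_len (d0 : PySem.Dict Int Int) (n : Int) : (pvG0 d0 n).length = n.toNat + 1 := by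
  rw [pvG0, PySem.List.pySetD_of_nonneg _ _ (by norm_num : (0:Int) ≤ 1),
    PySem.List.pySetD_of_nonneg _ _ (by norm_num : (0:Int) ≤ 0)]
  simp

theorem pvF_at (d0 : PySem.Dict Int Int) (k : Int) (h1 : k ≠ 1)
    (hgk : PySem.Dict.get? d0 k = none) (h700 : k ≤ 700) (g : List Int)
    (hread : ∀ q ∈ pvPows k, PySem.List.pyGetD g (k - q) 0 = pvF ((k - q).toNat + 1) d0 (k - q)) :
    pvMex (pvAddMoves 40 1 k g PySem.Set.empty) = pvF (k.toNat + 1) d0 k := by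
  rw [addMoves_eq, pows_eq k h700]
  have hpvf : pvF (k.toNat + 1) d0 k =
      pvMex (PySem.Set.ofList ((pvPows k).map (fun p => pvF k.toNat d0 (k - p)))) := by
    simp [pvF, h1, hgk]
  have hmap : (pvPows k).map (fun p => pvF k.toNat d0 (k - p)) =
      (pvPows k).map (fun q => PySem.List.pyGetD g (k - q) 0) := by
    apply List.map_congr_left
    intro q hq
    obtain ⟨hq1, hq2⟩ := mem_pvPows hq
    rw [hread q hq]
    exact pvF_irrel d0 k.toNat ((k - q).toNat + 1) (k - q) (by omega) (by omega)
  rw [hpvf, hmap, ← PySem.Set.update_nil_left, PySem.Set.update_map_eq_foldl_add]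
  rfl

theorem tableB (d0 : PySem.Dict Int Int) (n : Int) (h2 : 2 ≤ n) (h700 : n ≤ 700) :
    ∀ (j : Nat), (j : Int) + 1 ≤ n →
      ((PySem.List.pyRange 2 ((j : Int) + 2) 1).foldl (pvStepB d0) (pvG0 d0 n)).length = n.toNat + 1 ∧
      ∀ i : Nat, (i : Int) ≤ (j : Int) + 1 →
        PySem.List.pyGetD ((PySem.List.pyRange 2 ((j : Int) + 2) 1).foldl (pvStepB d0) (pvG0 d0 n)) (i : Int) 0
          = pvF (i + 1) d0 (i : Int) := by
  intro j
  induction j with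
  | zero =>
    intro hj
    rw [show ((0:Nat):Int) + 2 = 2 by norm_num, PySem.List.pyRange_one_eq_nil (by norm_num)]
    refine ⟨g0_len d0 n, ?_⟩
    intro i hi
    have hi1 : i ≤ 1 := by exact_mod_cast hi
    rw [List.foldl_nil, g0_get d0 n h2 i (by omega)]
    interval_cases i
    · -- i = 0
      simp only [if_neg (by norm_num : (0:Nat) ≠ 1), if_pos rfl]
      cases hg0 : PySem.Dict.get? d0 0 with
      | some w =>
        rw [PySem.Dict.getD_eq_get?_getD, hg0]
        simp [pvF, hg0]
      | none =>
        rw [PySem.Dict.getD_eq_get?_getD, hg0]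
        have : pvPows 0 = [] := by decide
        simp [pvF, hg0, this]
        rfl
    · -- i = 1
      simp [pvF]
  | succ j ihj =>
    intro hj
    have hj' : (j : Int) + 1 ≤ n := by push_cast at hj ⊢; omega
    obtain ⟨ihlen, ihval⟩ := ihj hj'
    have hsplit : PySem.List.pyRange 2 (((j+1 : Nat) : Int) + 2) 1 =
        PySem.List.pyRange 2 ((j : Int) + 2) 1 ++ [(j : Int) + 2] := by
      have : (((j+1 : Nat) : Int) + 2) = ((j : Int) + 2) + 1 := by push_cast; ring
      rw [this, PySem.List.pyRange_one_succ_right (by omega)]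
    rw [hsplit, List.foldl_append, List.foldl_cons, List.foldl_nil]
    set k : Int := (j : Int) + 2 with hk
    set Gp := (PySem.List.pyRange 2 ((j : Int) + 2) 1).foldl (pvStepB d0) (pvG0 d0 n) with hGp
    have hk2 : 2 ≤ k := by omega
    have hkn : k ≤ n := by push_cast at hj; omega
    have hktoNat : k.toNat < n.toNat + 1 := by omega
    have hwrite : ∀ (v : Int), (PySem.List.pySetD Gp k v).length = n.toNat + 1 ∧
        ∀ i : Nat, (i : Int) ≤ k →
          PySem.List.pyGetD (PySem.List.pySetD Gp k v) (i : Int) 0 =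
            if (i : Int) = k then v else pvF (i + 1) d0 (i : Int) := by
      intro v
      rw [PySem.List.pySetD_of_nonneg _ _ (by omega : (0:Int) ≤ k)]
      constructor
      · simp [ihlen]
      · intro i hi
        rw [PySem.List.pyGetD_natCast]
        rw [List.getD_eq_getElem?_getD, List.getElem?_set]
        by_cases hik : (i : Int) = k
        · have : k.toNat = i := by omega
          simp [this, ihlen, hik, show i < n.toNat + 1 by omega]
        · have hne : k.toNat ≠ i := by omega
          rw [if_neg hne]
          have := ihval i (by omega)
          rw [PySem.List.pyGetD_natCast, List.getD_eq_getElem?_getD] at this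
          rw [this, if_neg hik]
    -- the step writes the correct value at k
    have hval : pvStepB d0 Gp k = PySem.List.pySetD Gp k (pvF (k.toNat + 1) d0 k) := by
      rw [pvStepB]
      cases hgk : PySem.Dict.get? d0 k with
      | some v =>
        have : pvF (k.toNat + 1) d0 k = v := by simp [pvF, hgk, show k ≠ 1 by omega]
        rw [this]
      | none =>
        rw [pvF_at d0 k (by omega) hgk (by omega) Gp]
        intro q hq
        obtain ⟨hq1, hq2⟩ := mem_pvPows hq
        have hcast : k - q = (((k - q).toNat : Nat) : Int) := by omega
        rw [hcast]
        exact ihval (k - q).toNat (by omega)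
    rw [hval]
    obtain ⟨hl, hv⟩ := hwrite (pvF (k.toNat + 1) d0 k)
    refine ⟨hl, ?_⟩
    intro i hi
    have hi' : (i : Int) ≤ k := by push_cast at hi ⊢; omega
    rw [hv i hi']
    by_cases hik : (i : Int) = k
    · rw [if_pos hik]
      have : i = k.toNat := by omega
      subst this
      congr 1 <;> omega
    · rw [if_neg hik]

theorem altB_spec (n : Int) (memo : List (Int × Int)) (h2 : 2 ≤ n) (h700 : n ≤ 700)
    (hget : PySem.Dict.get? (PySem.Dict.ofList memo) n = none) :
    calculate_grundy_dp_alt n memo = pvF (n.toNat + 1) (PySem.Dict.ofList memo) n := by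
  rw [calculate_grundy_dp_alt]
  simp only [hget, show ¬ (n = 1) by omega, if_false, show ¬ (n < 1) by omega]
  set d0 := PySem.Dict.ofList memo
  have hj : ((n.toNat - 1 : Nat) : Int) + 1 ≤ n := by omega
  obtain ⟨_, hv⟩ := tableB d0 n h2 h700 (n.toNat - 1) hj
  have hrange : n + 1 = ((n.toNat - 1 : Nat) : Int) + 2 := by omega
  have := hv n.toNat (by omega)
  rw [← hrange] at this
  have hn : ((n.toNat : Nat) : Int) = n := by omega
  rw [hn] at this
  exact this

-- ===== VERDICT (by name: the statement is the Claim_ definition above) =====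
theorem calculate_grundy_dp_spec : Claim_equal_calculate_grundy_dp := by
  intro n memo _hdom hpre
  unfold Spec_calculate_grundy_dp
  by_cases h1 : n = 1
  · subst h1
    simp [calculate_grundy_dp, calculate_grundy_dp_alt, pvGoA]
  cases hg : PySem.Dict.get? (PySem.Dict.ofList memo) n with
  | some v =>
    simp [calculate_grundy_dp, calculate_grundy_dp_alt, pvGoA, h1, hg]
  | none =>
    have h700 : n ≤ 700 := by
      rcases hpre with h | h
      · exact h
      · rw [PySem.Dict.contains_eq_isSome_get?, hg] at h
        simp at h
    have hInv : pvInv (PySem.Dict.ofList memo) (PySem.Dict.ofList memo) :=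
      ⟨fun _ _ h => h, fun _ _ h => Or.inl h⟩
    have hA := (goA_spec (PySem.Dict.ofList memo) (n.toNat + 1) n (PySem.Dict.ofList memo)
      (by omega) hInv).1
    have hAeq : calculate_grundy_dp n memo = pvF (n.toNat + 1) (PySem.Dict.ofList memo) n := hA
    by_cases hlt : n < 1
    · -- B returns 0 directly; pvF also gives 0 (no powers to subtract)
      have hB : calculate_grundy_dp_alt n memo = 0 := by
        simp [calculate_grundy_dp_alt, h1, hg, hlt]
      have hz : n.toNat = 0 := by omega
      have hpow : pvPows n = [] := by
        have hno : ¬ ((1 : Int) ≤ n) := by omega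
        norm_num [pvPows, List.takeWhile,
          show List.range 10 = 0 :: [1,2,3,4,5,6,7,8,9] by decide, hno]
      rw [hAeq, hB, hz]
      simp [pvF, h1, hg, hpow]
      rfl
    · have h2 : 2 ≤ n := by omega
      rw [hAeq, altB_spec n memo h2 h700 hg]
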